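-- pv_equiv track=rewrite | github.com/TomWatson6/AdventOfCode | Python/2016_new/14/solution.py | repeating
-- ===== SOURCE A (Python) =====
-- def repeating(h, amt, val = None):
--     repeats = []
--
--     prev = h[0]
--     i = 0
--
--     for ch in h:
--         if ch == prev:
--             i += 1
--             continue
--
--         repeats.append((prev, i))
--         i = 1
--         prev = ch
--
--     repeats.append((h[-1], i))
--
--     for ch, count in repeats:
--         if count >= amt:
--             if val is not None:
--                 if val == ch:
--                     return ch
--             else:
--                 return ch
-- ===== SOURCE B (Python) =====
-- def repeating(h, amt, val = None):
--     # Single fused pass: no intermediate run-length list.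
--     prev = h[0]
--     count = 0
--     for ch in h:
--         if ch == prev:
--             count += 1
--         else:
--             if count >= amt and (val is None or val == prev):
--                 return prev
--             prev = ch
--             count = 1
--     if count >= amt and (val is None or val == prev):
--         return prev
--     return None
-- ===== Notes on version B (the rewrite author's own statement) =====
-- stated objective: simpler
-- what changed: B fuses A's two passes (build a run-length list, then scan it) into a single pass over the string that checks each run as it ends, never materializing the (char,count) list.
import Mathlib
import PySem

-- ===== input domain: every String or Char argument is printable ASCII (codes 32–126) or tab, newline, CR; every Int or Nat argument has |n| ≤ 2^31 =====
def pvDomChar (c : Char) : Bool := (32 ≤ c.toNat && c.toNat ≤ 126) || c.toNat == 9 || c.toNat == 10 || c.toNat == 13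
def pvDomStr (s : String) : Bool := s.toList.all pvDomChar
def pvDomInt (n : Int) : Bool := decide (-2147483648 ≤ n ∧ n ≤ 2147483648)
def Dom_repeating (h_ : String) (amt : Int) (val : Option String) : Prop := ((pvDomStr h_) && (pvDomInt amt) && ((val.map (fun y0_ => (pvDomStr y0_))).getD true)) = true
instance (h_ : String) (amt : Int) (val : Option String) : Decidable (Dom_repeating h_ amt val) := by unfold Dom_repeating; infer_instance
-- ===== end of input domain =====

-- B replaces A's two-phase algorithm (build run-length list, then scan it) by one fused pass; return values only (no mutation involved).

-- ===== PORT A =====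
-- fold step for A's first loop: state = (repeats, prev, i)
def pvStepA (st : List (String × Int) × Char × Int) (ch : Char) : List (String × Int) × Char × Int :=
  match st with
  | (reps, prev, i) =>
    if ch = prev then (reps, prev, i + 1)
    else (reps ++ [(String.mk [prev], i)], ch, 1)

-- A's second loop over the repeats list
def pvFindA (amt : Int) (val : Option String) : List (String × Int) → Option String
  | [] => none
  | (ch, count) :: rest =>
    if count ≥ amt then
      match val with
      | some v => if v = ch then some ch else pvFindA amt val rest
      | none => some ch
    else pvFindA amt val rest

def repeating (h_ : String) (amt : Int) (val : Option String) : Option String :=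
  match h_.toList with
  | [] => none   -- Python raises IndexError here (h[0]); excluded by Pre_
  | c :: rest =>
    let st := (c :: rest).foldl pvStepA ([], c, 0)
    pvFindA amt val (st.1 ++ [(String.mk [(c :: rest).getLast (by simp)], st.2.2)])

-- ===== PORT B =====
def pvOkB (amt : Int) (val : Option String) (prev : Char) (count : Int) : Bool :=
  decide (count ≥ amt) && (val.isNone || val == some (String.mk [prev]))

def pvLoopB (amt : Int) (val : Option String) : List Char → Char → Int → Option String
  | [], prev, count =>
    if pvOkB amt val prev count then some (String.mk [prev]) else none
  | ch :: rest, prev, count =>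
    if ch = prev then pvLoopB amt val rest prev (count + 1)
    else if pvOkB amt val prev count then some (String.mk [prev])
    else pvLoopB amt val rest ch 1

def repeating_alt (h_ : String) (amt : Int) (val : Option String) : Option String :=
  match h_.toList with
  | [] => none   -- Python raises IndexError here (h[0]); excluded by Pre_
  | c :: rest => pvLoopB amt val (c :: rest) c 0

-- ===== PRECONDITION & SPEC =====
-- Pre_ excludes only the empty string, on which A (and B) raise IndexError at h[0].
def Pre_repeating (h_ : String) (amt : Int) (val : Option String) : Prop := h_ ≠ ""
instance (h_ : String) (amt : Int) (val : Option String) : Decidable (Pre_repeating h_ amt val) := by unfold Pre_repeating; infer_instance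
def pvWitness_repeating : String × Int × Option String := ("aabbba", 3, none)

def Spec_repeating (h_ : String) (amt : Int) (val : Option String) (out : Option String) : Prop := out = repeating_alt h_ amt val
instance (h_ : String) (amt : Int) (val : Option String) (out : Option String) : Decidable (Spec_repeating h_ amt val out) := by unfold Spec_repeating; infer_instance

-- ===== CLAIM (what is proved, stated in full; the proofs are below) =====
def Claim_equal_repeating : Prop := ∀ (h_ : String) (amt : Int) (val : Option String), Dom_repeating h_ amt val → Pre_repeating h_ amt val → Spec_repeating h_ amt val (repeating h_ amt val)

-- ===== LEMMAS AND PROOFS =====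

-- accumulator lemma: the repeats list built by the fold is an append onto the initial one
theorem pvStepA_acc (l : List Char) (r0 : List (String × Int)) (p : Char) (n : Int) :
    l.foldl pvStepA (r0, p, n) =
      (r0 ++ (l.foldl pvStepA ([], p, n)).1, (l.foldl pvStepA ([], p, n)).2) := by
  induction l generalizing r0 p n with
  | nil => simp
  | cons ch rest ih =>
    simp only [List.foldl_cons, pvStepA]
    by_cases h : ch = p
    · simp only [h]
      exact ih r0 p (n + 1)
    · simp only [if_neg h, List.nil_append]
      rw [ih (r0 ++ [(String.mk [p], n)]) ch 1, ih [(String.mk [p], n)] ch 1]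
      simp

-- the fold's final prev is the last character (default: initial prev)
theorem pvStepA_last (l : List Char) (r0 : List (String × Int)) (p : Char) (n : Int) :
    (l.foldl pvStepA (r0, p, n)).2.1 = l.getLastD p := by
  induction l generalizing r0 p n with
  | nil => simp
  | cons ch rest ih =>
    simp only [List.foldl_cons, pvStepA, List.getLastD_cons]
    by_cases h : ch = p
    · rw [if_pos h, ih, h]
    · rw [if_neg h, ih]

-- A's scan on a cons is a single pvOkB-style test
theorem pvFindA_cons (amt : Int) (val : Option String) (s : String) (n : Int) (L : List (String × Int)) :
    pvFindA amt val ((s, n) :: L) =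
      if (decide (n ≥ amt) && (val.isNone || val == some s)) then some s
      else pvFindA amt val L := by
  cases val with
  | none =>
    simp only [pvFindA, Option.isNone_none, Bool.true_or, Bool.and_true]
    by_cases h : n ≥ amt <;> simp [h]
  | some v =>
    simp only [pvFindA, Option.isNone_some]
    by_cases h : n ≥ amt
    · by_cases hv : v = s <;> simp [h, hv]
    · simp [h]

-- main invariant: scanning the repeats-so-far-completed (none)  plus the final run equals B's fused loop
theorem pv_main (amt : Int) (val : Option String) (l : List Char) (prev : Char) (i : Int) :
    pvFindA amt val ((l.foldl pvStepA ([], prev, i)).1 ++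
        [(String.mk [(l.foldl pvStepA ([], prev, i)).2.1], (l.foldl pvStepA ([], prev, i)).2.2)]) =
      pvLoopB amt val l prev i := by
  induction l generalizing prev i with
  | nil =>
    simp only [List.foldl_nil, List.nil_append, pvLoopB, pvFindA_cons, pvOkB, pvFindA]
    rfl
  | cons ch rest ih =>
    simp only [List.foldl_cons, pvStepA]
    by_cases h : ch = prev
    · simp only [pvLoopB, if_pos h]
      exact ih prev (i + 1)
    · simp only [pvLoopB, if_neg h]
      simp only [List.nil_append]
      rw [pvStepA_acc rest [(String.mk [prev], i)] ch 1]
      simp only [List.cons_append, List.nil_append, pvFindA_cons, pvOkB]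
      rw [ih ch 1]
      rfl

-- getLast of a cons equals getLastD with the head as default
theorem getLast_cons_eq_getLastD (rest : List Char) (c : Char) :
    (c :: rest).getLast (by simp) = (c :: rest).getLastD c := by
  rw [List.getLastD_eq_getLast?, List.getLast?_eq_some_getLast (by simp : (c :: rest) ≠ []), Option.getD_some]

-- ===== VERDICT (by name: the statement is the Claim_ definition above) =====
theorem repeating_spec : Claim_equal_repeating := by
  intro h_ amt val _ hpre
  unfold Spec_repeating repeating repeating_alt
  cases hl : h_.toList with
  | nil => exact absurd (by simpa using congrArg String.ofList hl) hpre
  | cons c rest =>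
    simp only
    rw [getLast_cons_eq_getLastD, ← pvStepA_last (c :: rest) [] c 0]
    exact pv_main amt val (c :: rest) c 0
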